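-- pv_equiv track=rewrite | github.com/wlanboy/mcp-md-fileserver | extractor.py | _deduplicate_keywords
-- ===== SOURCE A (Python) =====
-- def _deduplicate_keywords(keywords: set[str]) -> set[str]:
--     """Entfernt fehlerhafte Kurz-Lemmata, wenn eine längere Variante existiert.
--     Z.B. 'kubernet' wird entfernt wenn 'kubernetes' vorhanden ist.
--     """
--     to_remove = set()
--     sorted_kw = sorted(keywords, key=len)
--     for i, short in enumerate(sorted_kw):
--         if len(short) < 4:
--             continue
--         for long in sorted_kw[i + 1:]:
--             if long.startswith(short) and len(long) - len(short) <= 3: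
--                 to_remove.add(short)
--                 break
--     return keywords - to_remove
-- ===== SOURCE B (Python) =====
-- def _deduplicate_keywords(keywords: set[str]) -> set[str]:
--     """Hash-based: collect every 1-3-char truncation of each keyword once, then keep a
--     keyword unless it is such a truncation (and has length >= 4). No sorting, no inner scan."""
--     near_prefixes = {t[:-d] for t in keywords for d in (1, 2, 3)}
--     return {s for s in keywords if len(s) < 4 or s not in near_prefixes}
-- ===== Notes on version B (the rewrite author's own statement) =====
-- stated objective: faster
-- what changed: Replaces the length-sort plus quadratic forward-scan-with-break by a hash set of every 1-3-character truncation of the keywords, so each keyword is kept or dropped by one set lookup and the inner scan disappears.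
import Mathlib
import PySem

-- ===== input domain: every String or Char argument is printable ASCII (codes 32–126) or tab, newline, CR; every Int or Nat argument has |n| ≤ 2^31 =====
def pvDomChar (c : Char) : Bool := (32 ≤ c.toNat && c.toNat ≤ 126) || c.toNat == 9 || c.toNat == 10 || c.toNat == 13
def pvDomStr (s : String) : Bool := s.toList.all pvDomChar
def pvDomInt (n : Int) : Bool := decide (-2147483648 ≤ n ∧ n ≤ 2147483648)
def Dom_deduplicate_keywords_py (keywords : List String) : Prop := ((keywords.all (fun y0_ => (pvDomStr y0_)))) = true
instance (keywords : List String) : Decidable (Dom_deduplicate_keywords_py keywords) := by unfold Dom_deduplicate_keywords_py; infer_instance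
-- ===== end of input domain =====

-- B replaces A's length-sort + quadratic forward-scan by a hash set of all 1-3-char
-- truncations of the keywords: one lookup per keyword (objective: faster, asymptotic).


-- ===== PORT A =====
-- inner loop: 'for long in sorted_kw[i+1:]: if … : to_remove.add(short); break'
def pvScanA (short : String) : List String → Bool
  | [] => false
  | t :: rest =>
      if PySem.Str.startswith t short && decide (PySem.Str.len t - PySem.Str.len short ≤ 3) then
        true
      else pvScanA short rest

-- outer loop over the length-sorted list; the tail IS sorted_kw[i+1:]
def pvLoopA : List String → PySem.Set String → PySem.Set String
  | [], to_remove => to_remove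
  | short :: rest, to_remove =>
      pvLoopA rest
        (if decide (PySem.Str.len short < 4) then to_remove
         else if pvScanA short rest then PySem.Set.add to_remove short
         else to_remove)

def deduplicate_keywords_py (keywords : List String) : List String :=
  let kw : PySem.Set String := PySem.Set.ofList keywords
  let sorted_kw := PySem.List.sorted kw (fun s => PySem.Str.len s)
  let to_remove := pvLoopA sorted_kw PySem.Set.empty
  PySem.Set.diff kw to_remove

-- ===== PORT B =====
-- near_prefixes = {t[:-d] for t in keywords for d in (1, 2, 3)}
def pvNearPrefixes (keywords : List String) : PySem.Set String :=
  PySem.Set.ofList (keywords.flatMap (fun t =>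
    [PySem.Str.slice t none (some (-1)),
     PySem.Str.slice t none (some (-2)),
     PySem.Str.slice t none (some (-3))]))

def deduplicate_keywords_py_alt (keywords : List String) : List String :=
  let near_prefixes := pvNearPrefixes keywords
  (PySem.Set.ofList keywords).filter
    (fun s => decide (PySem.Str.len s < 4) || ! PySem.Set.contains near_prefixes s)

-- ===== PRECONDITION & SPEC =====
def Spec_deduplicate_keywords_py (keywords : List String) (out : List String) : Prop := out = deduplicate_keywords_py_alt keywords
instance (keywords : List String) (out : List String) : Decidable (Spec_deduplicate_keywords_py keywords out) := by unfold Spec_deduplicate_keywords_py; infer_instance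

-- ===== CLAIM (what is proved, stated in full; the proofs are below) =====
def Claim_equal_deduplicate_keywords_py : Prop := ∀ (keywords : List String), Dom_deduplicate_keywords_py keywords → Spec_deduplicate_keywords_py keywords (deduplicate_keywords_py keywords)

-- ===== LEMMAS AND PROOFS =====

-- 'short' was marked for removal by A's loop over the list l
def pvMark (x : String) : List String → Prop
  | [] => False
  | s :: rest => (x = s ∧ 4 ≤ PySem.Str.len s ∧ pvScanA s rest = true) ∨ pvMark x rest

theorem pvScanA_eq_any (s : String) (l : List String) :
    pvScanA s l =
      l.any (fun t => PySem.Str.startswith t s && decide (PySem.Str.len t - PySem.Str.len s ≤ 3)) := by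
  induction l with
  | nil => rfl
  | cons t rest ih =>
      simp only [pvScanA, List.any_cons, ← ih]
      split <;> simp_all

theorem mem_pvLoopA (x : String) (l : List String) (acc : PySem.Set String) :
    x ∈ pvLoopA l acc ↔ x ∈ acc ∨ pvMark x l := by
  induction l generalizing acc with
  | nil => simp [pvLoopA, pvMark]
  | cons s rest ih =>
      simp only [pvLoopA, pvMark, ih]
      split_ifs with h1 h2
      · have h4 : ¬ (4 ≤ PySem.Str.len s) := by simp only [decide_eq_true_eq] at h1; omega
        tauto
      · simp only [PySem.Set.mem_add]
        have h4 : 4 ≤ PySem.Str.len s := by simp only [decide_eq_true_eq] at h1; omega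
        tauto
      · have h4 : 4 ≤ PySem.Str.len s := by simp only [decide_eq_true_eq] at h1; omega
        tauto

-- prefix fact: a prefix at least as long as the word is the word itself
theorem startswith_eq_of_len_le (t x : String) (h : PySem.Str.startswith t x = true)
    (hl : PySem.Str.len t ≤ PySem.Str.len x) : t = x := by
  rw [PySem.Str.startswith_eq, PySem.Chars.startswith_iff] at h
  simp only [PySem.Str.len_eq, Nat.cast_le] at hl
  have := List.IsPrefix.eq_of_length_le h hl
  have : t.toList = x.toList := this.symm
  exact String.toList_injective this

-- A marks x (over a nodup list) only if a distinct near-extension exists in the list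
theorem pvMark_to_ext (x : String) (l : List String) (hnd : l.Nodup) (h : pvMark x l) :
    4 ≤ PySem.Str.len x ∧ ∃ t ∈ l, t ≠ x ∧ PySem.Str.startswith t x = true ∧
      PySem.Str.len t - PySem.Str.len x ≤ 3 := by
  induction l with
  | nil => exact absurd h (by simp [pvMark])
  | cons s rest ih =>
      rcases List.nodup_cons.mp hnd with ⟨hns, hndr⟩
      rcases h with ⟨rfl, h4, hscan⟩ | h
      · refine ⟨h4, ?_⟩
        rw [pvScanA_eq_any] at hscan
        rcases List.any_eq_true.mp hscan with ⟨t, ht, hc⟩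
        have hc' : PySem.Str.startswith t x = true ∧ PySem.Str.len t - PySem.Str.len x ≤ 3 := by
          simpa using hc
        exact ⟨t, List.mem_cons_of_mem _ ht, fun he => hns (he ▸ ht), hc'.1, hc'.2⟩
      · rcases ih hndr h with ⟨h4, t, ht, hrest⟩
        exact ⟨h4, t, List.mem_cons_of_mem _ ht, hrest⟩

-- conversely, on a list nodup and sorted by length, a distinct near-extension forces the mark
theorem ext_to_pvMark (x : String) (l : List String) (hnd : l.Nodup)
    (hp : l.Pairwise (fun a b => PySem.Str.len a ≤ PySem.Str.len b))
    (hx : x ∈ l) (h4 : 4 ≤ PySem.Str.len x)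
    (t : String) (ht : t ∈ l) (htx : t ≠ x) (hsw : PySem.Str.startswith t x = true)
    (hlen : PySem.Str.len t - PySem.Str.len x ≤ 3) : pvMark x l := by
  induction l with
  | nil => cases hx
  | cons s rest ih =>
      rcases List.nodup_cons.mp hnd with ⟨hns, hndr⟩
      rcases List.pairwise_cons.mp hp with ⟨hps, hpr⟩
      by_cases hxs : x = s
      · -- x is the head; t must be in rest, so the scan finds it
        have htr : t ∈ rest := by
          rcases ht with _ | htr
          · exact absurd (hxs.symm) htx
          · assumption
        refine Or.inl ⟨hxs, hxs ▸ h4, ?_⟩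
        rw [pvScanA_eq_any]
        refine List.any_eq_true.mpr ⟨t, htr, ?_⟩
        subst hxs
        simp only [hsw, Bool.true_and, decide_eq_true_eq]
        exact hlen
      · -- x is in rest; t cannot be the head s (s is no longer than x, but t is strictly longer)
        have hxr : x ∈ rest := by
          rcases hx with _ | hxr
          · exact absurd rfl hxs
          · assumption
        have hlt : PySem.Str.len x < PySem.Str.len t := by
          rcases lt_or_ge (PySem.Str.len x) (PySem.Str.len t) with h | h
          · exact h
          · exact absurd (startswith_eq_of_len_le t x hsw h) htx
        have htr : t ∈ rest := by
          rcases ht with _ | htr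
          · exact absurd (lt_of_lt_of_le hlt (by exact hps x hxr)) (lt_irrefl _)
          · assumption
        exact Or.inr (ih hndr hpr hxr htr)

-- t[:-d] is take (len t - d)
theorem pvSliceNeg (t : String) (d : Nat) (hd : 1 ≤ d) :
    (PySem.Str.slice t none (some (-(d : Int)))).toList = t.toList.take (t.toList.length - d) := by
  rw [PySem.Str.toList_slice]
  simp only [PySem.Chars.slice_eq_listSlice, PySem.List.slice, PySem.List.clampIdx]
  norm_num
  split_ifs <;> first | rfl | (congr 1; omega)

theorem mem_pvNearPrefixes (keywords : List String) (x : String) :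
    x ∈ pvNearPrefixes keywords ↔
      ∃ t ∈ keywords, ∃ d : Nat, 1 ≤ d ∧ d ≤ 3 ∧ PySem.Str.slice t none (some (-(d : Int))) = x := by
  unfold pvNearPrefixes
  rw [PySem.Set.mem_ofList]
  simp only [List.mem_flatMap, List.mem_cons, List.not_mem_nil, or_false]
  constructor
  · rintro ⟨t, ht, h | h | h⟩
    · exact ⟨t, ht, 1, by norm_num, by norm_num, h.symm⟩
    · exact ⟨t, ht, 2, by norm_num, by norm_num, h.symm⟩
    · exact ⟨t, ht, 3, by norm_num, by norm_num, h.symm⟩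
  · rintro ⟨t, ht, d, hd1, hd3, h⟩
    refine ⟨t, ht, ?_⟩
    interval_cases d
    · exact Or.inl h.symm
    · exact Or.inr (Or.inl h.symm)
    · exact Or.inr (Or.inr h.symm)

-- for a keyword of length ≥ 4, being a 1-3-char truncation is the same as having a
-- distinct near-extension
theorem near_iff_ext (keywords : List String) (x : String) (h4 : 4 ≤ PySem.Str.len x) :
    x ∈ pvNearPrefixes keywords ↔
      ∃ t ∈ keywords, t ≠ x ∧ PySem.Str.startswith t x = true ∧
        PySem.Str.len t - PySem.Str.len x ≤ 3 := by
  rw [PySem.Str.len_eq] at h4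
  have hx4 : 4 ≤ x.toList.length := by exact_mod_cast h4
  rw [mem_pvNearPrefixes]
  constructor
  · rintro ⟨t, ht, d, hd1, hd3, h⟩
    have hto : x.toList = t.toList.take (t.toList.length - d) := by
      rw [← h, pvSliceNeg t d hd1]
    have hlenx : x.toList.length = min (t.toList.length - d) t.toList.length := by
      rw [hto, List.length_take]
    have hdn : d < t.toList.length := by omega
    have hlen : x.toList.length = t.toList.length - d := by omega
    refine ⟨t, ht, ?_, ?_, ?_⟩
    · intro he
      rw [he] at hlenx
      omega
    · rw [PySem.Str.startswith_eq, PySem.Chars.startswith_iff, hto]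
      exact List.take_prefix _ _
    · simp only [PySem.Str.len_eq]
      omega
  · rintro ⟨t, ht, htx, hsw, hlen⟩
    have hlt : PySem.Str.len x < PySem.Str.len t := by
      rcases lt_or_ge (PySem.Str.len x) (PySem.Str.len t) with h | h
      · exact h
      · exact absurd (startswith_eq_of_len_le t x hsw h) htx
    simp only [PySem.Str.len_eq] at hlt hlen
    have hltn : x.toList.length < t.toList.length := by exact_mod_cast hlt
    refine ⟨t, ht, t.toList.length - x.toList.length, by omega, by omega, ?_⟩
    rw [PySem.Str.startswith_eq, PySem.Chars.startswith_iff] at hsw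
    apply String.toList_injective
    rw [pvSliceNeg t _ (by omega)]
    have : t.toList.length - (t.toList.length - x.toList.length) = x.toList.length := by omega
    rw [this]
    exact (List.prefix_iff_eq_take.mp hsw).symm

theorem key_equiv (keywords : List String) (x : String)
    (hx : x ∈ PySem.Set.ofList keywords) :
    (PySem.Set.contains
        (pvLoopA (PySem.List.sorted (PySem.Set.ofList keywords) (fun s => PySem.Str.len s))
          PySem.Set.empty) x)
      = (!decide (PySem.Str.len x < 4) && PySem.Set.contains (pvNearPrefixes keywords) x) := by
  set kw := PySem.Set.ofList keywords with hkw
  set L := PySem.List.sorted kw (fun s => PySem.Str.len s) with hL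
  have hndkw : kw.Nodup := PySem.Set.nodup_ofList keywords
  have hnd : L.Nodup := ((PySem.List.sorted_perm kw (fun s => PySem.Str.len s) false)).nodup_iff.mpr hndkw
  have hp := PySem.List.sorted_pairwise kw (fun s => PySem.Str.len s)
  have hxL : x ∈ L := (PySem.List.mem_sorted kw _ false x).mpr hx
  by_cases hm : pvMark x L
  · rcases pvMark_to_ext x L hnd hm with ⟨h4, t, ht, htx, hsw, hlen⟩
    have htk : t ∈ keywords := by
      have := (PySem.List.mem_sorted kw _ false t).mp ht
      exact (PySem.Set.mem_ofList keywords t).mp this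
    have hnear : x ∈ pvNearPrefixes keywords :=
      (near_iff_ext keywords x h4).mpr ⟨t, htk, htx, hsw, hlen⟩
    rw [(PySem.Set.contains_iff _ _).mpr ((mem_pvLoopA x L PySem.Set.empty).mpr (Or.inr hm)),
      (PySem.Set.contains_iff _ _).mpr hnear]
    have : decide (PySem.Str.len x < 4) = false := by
      simp only [decide_eq_false_iff_not, not_lt]; exact h4
    rw [this]
    rfl
  · have hLHS : PySem.Set.contains (pvLoopA L PySem.Set.empty) x = false := by
      by_contra hcon
      have := (PySem.Set.contains_iff _ x).mp (Bool.of_not_eq_false hcon)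
      exact hm ((mem_pvLoopA x L PySem.Set.empty).mp this |>.resolve_left (by simp [PySem.Set.empty]))
    rw [hLHS]
    by_contra hcon
    rcases Bool.and_eq_true_iff.mp (Bool.of_not_eq_false (fun h => hcon h.symm)) with ⟨hd4, hcn⟩
    have h4 : 4 ≤ PySem.Str.len x := by
      simp only [Bool.not_eq_eq_eq_not, Bool.not_true, decide_eq_false_iff_not, not_lt] at hd4
      exact hd4
    rcases (near_iff_ext keywords x h4).mp ((PySem.Set.contains_iff _ _).mp hcn) with
      ⟨t, htk, htx, hsw, hlen⟩
    have htL : t ∈ L := (PySem.List.mem_sorted kw _ false t).mpr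
      ((PySem.Set.mem_ofList keywords t).mpr htk)
    exact hm (ext_to_pvMark x L hnd hp hxL h4 t htL htx hsw hlen)

-- ===== VERDICT (by name: the statement is the Claim_ definition above) =====
theorem deduplicate_keywords_py_spec : Claim_equal_deduplicate_keywords_py := by
  intro keywords _
  unfold Spec_deduplicate_keywords_py deduplicate_keywords_py deduplicate_keywords_py_alt
  show PySem.Set.diff _ _ = _
  have hdiff : ∀ (s t : PySem.Set String),
      PySem.Set.diff s t = s.filter (fun x => ! PySem.Set.contains t x) := fun _ _ => rfl
  rw [hdiff]
  refine List.filter_congr (fun x hx => ?_)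
  rw [key_equiv keywords x hx]
  cases h4 : decide (PySem.Str.len x < 4) <;>
    cases hc : PySem.Set.contains (pvNearPrefixes keywords) x <;> rfl
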